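-- pv_equiv track=rewrite | github.com/mutjin08/Cote | Dynamic Programming 1 (동적계획법 1)/22857_가장 긴 짝수 연속한 부분 수열 (small).py | solution
-- ===== SOURCE A (Python) =====
-- def solution(n,k,nums):
--     dp=[[0 for _ in range(k+1)] for _ in range(n+1)]
--
--     for i in range(1,n+1):
--         nums[i]%=2
--         for j in range(k+1):
--             if nums[i]==0:
--                 dp[i][j]=dp[i-1][j]+1
--             elif nums[i]!=0 and j!=0:
--                 dp[i][j]=dp[i-1][j-1]
--
--     return max(map(max,dp))
-- ===== SOURCE B (Python) =====
-- def solution(n, k, nums):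
--     # Sliding window over nums[1..n]: keep at most k odds in the window.
--     # runs[t] = number of evens immediately before the (t+1)-th odd of the
--     # window; cur = evens after the last odd; ev = evens in the window.
--     best = 0
--     ev = 0
--     cur = 0
--     runs = []
--     for i in range(1, n + 1):
--         if nums[i] % 2 == 0:
--             ev += 1
--             cur += 1
--         else:
--             runs.append(cur)
--             cur = 0
--             if len(runs) > k:
--                 ev -= runs.pop(0)
--         if ev > best:
--             best = ev
--     return best
-- ===== Notes on version B (the rewrite author's own statement) =====
-- stated objective: faster
-- what changed: Replaces the (n+1)x(k+1) DP table with a single O(n) sliding window that keeps at most k odds, storing the even-run length before each odd in a queue so the window shrinks in O(1) amortized.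
import Mathlib
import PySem

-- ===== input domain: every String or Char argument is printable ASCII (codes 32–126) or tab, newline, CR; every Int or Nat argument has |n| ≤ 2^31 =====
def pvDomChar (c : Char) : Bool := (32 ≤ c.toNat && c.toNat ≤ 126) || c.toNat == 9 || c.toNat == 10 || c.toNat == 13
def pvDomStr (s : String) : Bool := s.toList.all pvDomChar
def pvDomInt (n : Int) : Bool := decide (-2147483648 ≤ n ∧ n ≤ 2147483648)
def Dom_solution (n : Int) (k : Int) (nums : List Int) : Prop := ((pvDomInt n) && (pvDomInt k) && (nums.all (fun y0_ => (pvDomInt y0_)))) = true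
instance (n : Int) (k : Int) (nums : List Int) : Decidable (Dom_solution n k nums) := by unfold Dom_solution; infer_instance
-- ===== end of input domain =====

-- B replaces A's (n+1)×(k+1) DP table with one O(n) sliding window (at most k
-- odds kept, even-run lengths queued).  Python A mutates nums (nums[i] %= 2):
-- each index is written once, right where it is read in the same iteration
-- (captured below as the local value v), and never read again, so the port
-- reads the original list; the equivalence is about the return value.

-- ===== PORT A =====
-- dp[0] = the row of k+1 zeros; dp[i] is computed from dp[i-1] alone and every
-- row 1..n is filled exactly once in loop order, so the fold accumulates rows.
def zeroRow (k : Int) : List Int :=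
  (PySem.List.pyRange 0 (k+1) 1).map (fun _ => (0:Int))

-- the inner 'for j in range(k+1)' filling dp[i] from prev = dp[i-1], v = nums[i]
def rowStepA (k : Int) (prev : List Int) (v : Int) : List Int :=
  (PySem.List.pyRange 0 (k+1) 1).map (fun j =>
    if v = 0 then PySem.List.pyGetD prev j 0 + 1
    else if j ≠ 0 then PySem.List.pyGetD prev (j-1) 0
    else 0)

def stepA (k : Int) (dp : List (List Int)) (x : Int) : List (List Int) :=
  dp ++ [rowStepA k (dp.getLastD []) (PySem.Int.mod x 2)]

-- max(row); the .getD 0 is unreachable under Pre_ (rows are nonempty for 0 ≤ k)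
def rowMaxA (row : List Int) : Int :=
  (PySem.List.max? row (fun y => y)).getD 0

def solution (n : Int) (k : Int) (nums : List Int) : Int :=
  (PySem.List.max?
    (((PySem.List.pyRange 1 (n+1) 1).foldl
        (fun dp i => stepA k dp (PySem.List.pyGetD nums i 0)) [zeroRow k]).map rowMaxA)
    (fun y => y)).getD 0

-- ===== PORT B =====
-- state st = (best, ev, cur, runs): best so far, evens in the window, evens
-- since the last odd, and the even-run length before each odd of the window
def stepB (k : Int) (st : Int × Int × Int × List Int) (x : Int) : Int × Int × Int × List Int :=
  let s :=
    if PySem.Int.mod x 2 = 0 then (st.2.1 + 1, st.2.2.1 + 1, st.2.2.2)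
    else
      let runs := st.2.2.2 ++ [st.2.2.1]
      if (runs.length : Int) > k then (st.2.1 - runs.headD 0, 0, runs.tail)   -- runs.pop(0)
      else (st.2.1, 0, runs)
  (if s.1 > st.1 then s.1 else st.1, s)

def solution_alt (n : Int) (k : Int) (nums : List Int) : Int :=
  ((PySem.List.pyRange 1 (n+1) 1).foldl
    (fun st i => stepB k st (PySem.List.pyGetD nums i 0)) (0, 0, 0, [])).1

-- ===== PRECONDITION & SPEC =====
-- A raises outside Pre_: ValueError (max of an empty row/table) when n < 0 or
-- k < 0, and IndexError on nums[i] when 1 ≤ i ≤ n ≥ len(nums).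
def Pre_solution (n : Int) (k : Int) (nums : List Int) : Prop :=
  0 ≤ n ∧ 0 ≤ k ∧ (n = 0 ∨ n < (nums.length : Int))
instance (n : Int) (k : Int) (nums : List Int) : Decidable (Pre_solution n k nums) := by unfold Pre_solution; infer_instance

def pvWitness_solution : Int × Int × List Int := (4, 1, [0, 2, 4, 1, 6])

def Spec_solution (n : Int) (k : Int) (nums : List Int) (out : Int) : Prop := out = solution_alt n k nums
instance (n : Int) (k : Int) (nums : List Int) (out : Int) : Decidable (Spec_solution n k nums out) := by unfold Spec_solution; infer_instance

-- ===== CLAIM (what is proved, stated in full; the proofs are below) =====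
def Claim_equal_solution : Prop := ∀ (n : Int) (k : Int) (nums : List Int), Dom_solution n k nums → Pre_solution n k nums → Spec_solution n k nums (solution n k nums)


-- ===== LEMMAS AND PROOFS =====

-- coupling invariant between A's current dp row and B's window state:
-- with m = runs.length, row[m-t] = (runs.drop t).sum + cur for t ≤ m, the row
-- is constant (= ev) from index m up, and ev = runs.sum + cur.
def rowOK (k : Int) (row : List Int) (ev cur : Int) (runs : List Int) : Prop :=
  row.length = (k+1).toNat ∧
  ((runs.length : Int) ≤ k) ∧
  0 ≤ cur ∧ (∀ a ∈ runs, 0 ≤ a) ∧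
  ev = runs.sum + cur ∧
  (∀ t : Nat, t ≤ runs.length → row.getD (runs.length - t) 0 = (runs.drop t).sum + cur) ∧
  (∀ j : Nat, runs.length ≤ j → j < (k+1).toNat → row.getD j 0 = ev)

-- invariant coupling A's accumulated table with B's whole state
def invAB (k : Int) (dp : List (List Int)) (st : Int × Int × Int × List Int) : Prop :=
  dp ≠ [] ∧ rowOK k (dp.getLastD []) st.2.1 st.2.2.1 st.2.2.2 ∧
  (PySem.List.max? (dp.map rowMaxA) (fun y => y)).getD 0 = st.1

theorem length_rowStepA (k : Int) (prev : List Int) (v : Int) :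
    (rowStepA k prev v).length = (k+1).toNat := by
  simp [rowStepA, PySem.List.length_pyRange_one]

theorem getD_rowStepA (k : Int) (prev : List Int) (v : Int) (j : Nat)
    (hj : j < (k+1).toNat) :
    (rowStepA k prev v).getD j 0 =
      if v = 0 then prev.getD j 0 + 1
      else if j ≠ 0 then prev.getD (j-1) 0
      else 0 := by
  have h0 : PySem.List.pyRange 0 (k+1) 1 = (List.range ((k+1)).toNat).map (fun t : Nat => (t : Int)) := by
    rw [PySem.List.pyRange_one 0 (k+1)]
    simp
  unfold rowStepA
  rw [h0, List.map_map]
  rw [List.getD_eq_getElem?_getD, List.getElem?_map, List.getElem?_range hj]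
  simp only [Option.map_some, Option.getD_some, Function.comp]
  by_cases hv : v = 0
  · simp [hv]
  · simp only [hv, if_false]
    by_cases hjz : j = 0
    · subst hjz; simp
    · have hcast : ((j:Int) - 1) = ((j - 1 : Nat) : Int) := by omega
      have hne : (j : Int) ≠ 0 := by exact_mod_cast hjz
      rw [if_pos hne, if_pos hjz, hcast]
      simp

theorem zeroRow_length (k : Int) : (zeroRow k).length = (k+1).toNat := by
  simp [zeroRow, PySem.List.length_pyRange_one]

theorem zeroRow_getD (k : Int) (j : Nat) : (zeroRow k).getD j 0 = 0 := by
  unfold zeroRow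
  rw [List.getD_eq_getElem?_getD, List.getElem?_map]
  cases h : (PySem.List.pyRange 0 (k+1) 1)[j]? <;> simp

theorem rowMax_of_rowOK {k : Int} {row : List Int} {ev cur : Int} {runs : List Int}
    (hk : 0 ≤ k) (h : rowOK k row ev cur runs) : rowMaxA row = ev := by
  obtain ⟨hlen, hmk, hcur, hruns, hev, hI1, hI2⟩ := h
  have hub : ∀ y ∈ row, y ≤ ev := by
    intro y hy
    obtain ⟨j, hj, rfl⟩ := List.mem_iff_getElem.mp hy
    rw [← List.getD_eq_getElem row 0 hj]
    by_cases hjm : runs.length ≤ j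
    · rw [hI2 j hjm (by omega)]
    · have ht : j = runs.length - (runs.length - j) := by omega
      rw [ht, hI1 (runs.length - j) (by omega)]
      have hsplit : runs.sum = (runs.take (runs.length - j)).sum + (runs.drop (runs.length - j)).sum := by
        rw [← List.sum_append, List.take_append_drop]
      have htake : 0 ≤ (runs.take (runs.length - j)).sum :=
        List.sum_nonneg (fun a ha => hruns a (List.mem_of_mem_take ha))
      omega
  have hmem : ev ∈ row := by
    have hj : runs.length < row.length := by omega
    have hgd : row.getD runs.length 0 = ev := hI2 runs.length le_rfl (by omega)
    rw [List.getD_eq_getElem row 0 hj] at hgd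
    exact hgd ▸ List.getElem_mem hj
  obtain ⟨r0, t, rfl⟩ : ∃ r0 t, row = r0 :: t := by
    cases row with
    | nil => simp at hlen; omega
    | cons a b => exact ⟨a, b, rfl⟩
  unfold rowMaxA
  rw [PySem.List.max?_id_cons]
  simp only [Option.getD_some]
  have h1 := PySem.List.le_foldl_max t r0
  have hle : t.foldl max r0 ≤ ev := by
    rcases PySem.List.foldl_max_mem t r0 with h2 | h2
    · rw [h2]; exact hub r0 List.mem_cons_self
    · exact hub _ (List.mem_cons_of_mem _ h2)
  have hge : ev ≤ t.foldl max r0 := by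
    rcases List.mem_cons.mp hmem with h3 | h3
    · rw [← h3] at h1 ⊢; exact h1.1
    · exact h1.2 _ h3
  omega

theorem rowOK_zero (k : Int) (hk : 0 ≤ k) : rowOK k (zeroRow k) 0 0 [] := by
  refine ⟨zeroRow_length k, by simpa using hk, le_refl 0, by simp, by simp, ?_, ?_⟩
  · intro t ht; simp [← List.getD_eq_getElem?_getD, zeroRow_getD]
  · intro j h1 h2; simpa using zeroRow_getD k j

theorem rowOK_step {k b : Int} {row : List Int} {ev cur : Int} {runs : List Int}
    (hk : 0 ≤ k) (h : rowOK k row ev cur runs) (x : Int) :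
    rowOK k (rowStepA k row (PySem.Int.mod x 2))
      (stepB k (b, ev, cur, runs) x).2.1
      (stepB k (b, ev, cur, runs) x).2.2.1
      (stepB k (b, ev, cur, runs) x).2.2.2 := by
  obtain ⟨hlen, hmk, hcur, hruns, hev, hI1, hI2⟩ := h
  have hm1 : runs.length < (k+1).toNat := by omega
  by_cases hv : PySem.Int.mod x 2 = 0
  · -- even element: ev+1, cur+1, runs unchanged
    simp only [stepB, hv, if_true]
    refine ⟨length_rowStepA k row _, hmk, by omega, hruns, by omega, ?_, ?_⟩
    · intro t ht
      rw [getD_rowStepA k row _ _ (by omega), if_pos rfl, hI1 t ht]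
      ring
    · intro j h1 h2
      rw [getD_rowStepA k row _ _ h2, if_pos rfl, hI2 j h1 h2]
  · -- odd element
    simp only [stepB, hv, if_false]
    by_cases hpop : (((runs ++ [cur]).length : Int)) > k
    · -- window already held k odds: pop the oldest run
      simp only [hpop, if_true]
      have hmk' : (runs.length : Int) = k := by
        simp only [List.length_append, List.length_cons, List.length_nil] at hpop
        omega
      cases runs with
      | nil =>
        -- k = 0
        have hk0 : k = 0 := by simpa using hmk'.symm
        simp only [List.nil_append, List.headD_cons, List.tail_cons]
        refine ⟨length_rowStepA k row _, by simp; omega, le_refl 0, by simp, ?_, ?_, ?_⟩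
        · simp only [List.sum_nil] at hev ⊢
          omega
        · intro t ht
          have ht0 : t = 0 := by simpa using ht
          subst ht0
          rw [getD_rowStepA k row _ _ (by simpa using hm1), if_neg hv]
          simp
        · intro j h1 h2
          have hj0 : j = 0 := by omega
          subst hj0
          rw [getD_rowStepA k row _ _ (by omega), if_neg hv]
          simp only [List.sum_nil] at hev
          simp
          omega
      | cons r0 rs =>
        simp only [List.cons_append, List.headD_cons, List.tail_cons]
        have hlen' : (rs ++ [cur]).length = (r0 :: rs).length := by simp
        refine ⟨length_rowStepA k row _, by rw [hlen']; exact hmk, le_refl 0, ?_, ?_, ?_, ?_⟩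
        · intro a ha
          rcases List.mem_append.mp ha with ha | ha
          · exact hruns a (List.mem_cons_of_mem _ ha)
          · rw [List.mem_singleton.mp ha]; exact hcur
        · simp only [List.sum_cons, List.sum_append, List.sum_nil] at hev ⊢
          omega
        · intro t ht
          rw [hlen'] at ht ⊢
          by_cases htm : t < (r0 :: rs).length
          · rw [getD_rowStepA k row _ _ (by omega), if_neg hv,
              if_pos (by omega : (r0 :: rs).length - t ≠ 0)]
            have hidx : (r0 :: rs).length - t - 1 = (r0 :: rs).length - (t+1) := by omega
            rw [hidx, hI1 (t+1) (by omega)]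
            have hdrop : (r0 :: rs).drop (t+1) = rs.drop t := by simp
            have hdrop2 : (rs ++ [cur]).drop t = rs.drop t ++ [cur] := by
              exact List.drop_append_of_le_length (by simpa using Nat.lt_succ_iff.mp htm)
            rw [hdrop, hdrop2]
            simp [List.sum_append]
          · have ht' : t = (r0 :: rs).length := by omega
            subst ht'
            rw [Nat.sub_self, getD_rowStepA k row _ _ (by omega), if_neg hv, if_neg (by simp)]
            rw [List.drop_of_length_le (by simp)]
            simp
        · intro j h1 h2
          rw [hlen'] at h1
          have hj : j = (r0 :: rs).length := by omega
          subst hj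
          rw [getD_rowStepA k row _ _ h2, if_neg hv,
            if_pos (by simp : (r0 :: rs).length ≠ 0)]
          have hidx : (r0 :: rs).length - 1 = (r0 :: rs).length - (0+1) := by omega
          rw [hidx, hI1 (0+1) (by simp)]
          simp only [List.drop_succ_cons, List.drop_zero, List.sum_cons] at hev ⊢
          omega
    · -- still fewer than k odds: keep the new run
      simp only [hpop, if_false]
      have hmk' : ((runs.length + 1 : Nat) : Int) ≤ k := by
        simp only [List.length_append, List.length_cons, List.length_nil] at hpop
        omega
      refine ⟨length_rowStepA k row _, by simpa using hmk', le_refl 0, ?_, ?_, ?_, ?_⟩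
      · intro a ha
        rcases List.mem_append.mp ha with ha | ha
        · exact hruns a ha
        · rw [List.mem_singleton.mp ha]; exact hcur
      · simp only [List.sum_append, List.sum_cons, List.sum_nil] at hev ⊢
        omega
      · intro t ht
        simp only [List.length_append, List.length_cons, List.length_nil] at ht ⊢
        by_cases htm : t ≤ runs.length
        · rw [getD_rowStepA k row _ _ (by omega), if_neg hv,
            if_pos (by omega : runs.length + 1 - t ≠ 0)]
          have hidx : runs.length + 1 - t - 1 = runs.length - t := by omega
          rw [hidx, hI1 t htm]
          rw [List.drop_append_of_le_length htm]
          simp [List.sum_append]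
        · have ht' : t = runs.length + 1 := by omega
          subst ht'
          rw [Nat.sub_self, getD_rowStepA k row _ _ (by omega), if_neg hv, if_neg (by simp)]
          rw [List.drop_of_length_le (by simp)]
          simp
      · intro j h1 h2
        simp only [List.length_append, List.length_cons, List.length_nil] at h1
        rw [getD_rowStepA k row _ _ h2, if_neg hv, if_pos (by omega : j ≠ 0)]
        rw [hI2 (j-1) (by omega) (by omega)]

theorem maxD_append_singleton (l : List Int) (a : Int) (hl : l ≠ []) :
    (PySem.List.max? (l ++ [a]) (fun y => y)).getD 0 =
      max ((PySem.List.max? l (fun y => y)).getD 0) a := by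
  obtain ⟨h0, t, rfl⟩ : ∃ h0 t, l = h0 :: t := by
    cases l with
    | nil => exact absurd rfl hl
    | cons a b => exact ⟨a, b, rfl⟩
  rw [List.cons_append, PySem.List.max?_id_cons, PySem.List.max?_id_cons]
  simp only [Option.getD_some]
  rw [List.foldl_append]
  simp

theorem invAB_step {k : Int} {dp : List (List Int)} {st : Int × Int × Int × List Int}
    (hk : 0 ≤ k) (h : invAB k dp st) (x : Int) :
    invAB k (stepA k dp x) (stepB k st x) := by
  obtain ⟨hne, hrow, hmax⟩ := h
  obtain ⟨b, ev, cur, runs⟩ := st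
  have hrow' := rowOK_step (b := b) hk hrow x
  refine ⟨by simp [stepA], ?_, ?_⟩
  · have hlast : (stepA k dp x).getLastD [] = rowStepA k (dp.getLastD []) (PySem.Int.mod x 2) := by
      simp [stepA]
    rw [hlast]
    exact hrow'
  · have hnewmax : rowMaxA (rowStepA k (dp.getLastD []) (PySem.Int.mod x 2))
        = (stepB k (b, ev, cur, runs) x).2.1 := rowMax_of_rowOK hk hrow'
    simp only [stepA, List.map_append, List.map_cons, List.map_nil]
    rw [maxD_append_singleton _ _ (by simpa using hne), hmax, hnewmax]
    have hfin : (stepB k (b, ev, cur, runs) x).1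
        = if (stepB k (b, ev, cur, runs) x).2.1 > b then (stepB k (b, ev, cur, runs) x).2.1 else b := rfl
    rw [hfin]
    rcases lt_or_ge b ((stepB k (b, ev, cur, runs) x).2.1) with hlt | hge
    · rw [if_pos hlt, max_eq_right hlt.le]
    · rw [if_neg (not_lt.mpr hge), max_eq_left hge]

theorem invAB_foldl {k : Int} (hk : 0 ≤ k) :
    ∀ (xs : List Int) (dp : List (List Int)) (st : Int × Int × Int × List Int),
      invAB k dp st → invAB k (xs.foldl (stepA k) dp) (xs.foldl (stepB k) st) := by
  intro xs
  induction xs with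
  | nil => intro dp st h; exact h
  | cons x t ih => intro dp st h; exact ih _ _ (invAB_step hk h x)

theorem invAB_init (k : Int) (hk : 0 ≤ k) : invAB k [zeroRow k] (0, 0, 0, []) := by
  refine ⟨by simp, rowOK_zero k hk, ?_⟩
  have h0 : rowMaxA (zeroRow k) = 0 := rowMax_of_rowOK hk (rowOK_zero k hk)
  simp [h0, PySem.List.max?_id_cons]

theorem foldl_read {β : Type} (f : β → Int → β) (nums : List Int) (n : Int) (init : β)
    (hn : 0 ≤ n) (hlen : n = 0 ∨ n < (nums.length : Int)) :
    (PySem.List.pyRange 1 (n+1) 1).foldl (fun s i => f s (PySem.List.pyGetD nums i 0)) init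
      = ((nums.take (n+1).toNat).drop 1).foldl f init := by
  rcases hlen with rfl | hlt
  · rw [PySem.List.pyRange_one_eq_nil (by omega)]
    have hnil : (nums.take ((0:Int)+1).toNat).drop 1 = [] := by
      apply List.drop_eq_nil_of_le
      simpa using List.length_take_le _ _
    rw [hnil]
    rfl
  · have hT : (((nums.take (n+1).toNat).length : Int)) = n + 1 := by
      rw [List.length_take]
      omega
    have hcong := PySem.List.foldl_congr_mem (PySem.List.pyRange 1 (n+1) 1)
      (fun s i => f s (PySem.List.pyGetD nums i 0))
      (fun s i => f s (PySem.List.pyGetD (nums.take (n+1).toNat) i 0)) init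
      (by
        intro acc i hi
        rw [PySem.List.mem_pyRange_one] at hi
        show f acc (PySem.List.pyGetD nums i 0)
          = f acc (PySem.List.pyGetD (nums.take (n+1).toNat) i 0)
        congr 1
        rw [PySem.List.pyGetD_eq_getElem _ _ (by omega) (by omega),
            PySem.List.pyGetD_eq_getElem _ _ (by omega) (by omega)]
        exact List.getElem_take.symm)
    rw [hcong]
    have hlem := PySem.List.foldl_pyRange_pyGetD' (nums.take (n+1).toNat) 0 f init
      (a := 1) (by norm_num)
    rw [hT] at hlem
    rw [hlem]
    norm_num

-- ===== VERDICT (by name: the statement is the Claim_ definition above) =====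
theorem solution_spec : Claim_equal_solution := by
  intro n k nums _hdom hpre
  obtain ⟨hn, hk, hlen⟩ := hpre
  unfold Spec_solution solution solution_alt
  rw [foldl_read (stepA k) nums n [zeroRow k] hn hlen,
      foldl_read (stepB k) nums n (0, 0, 0, []) hn hlen]
  exact (invAB_foldl hk ((nums.take (n+1).toNat).drop 1) _ _ (invAB_init k hk)).2.2
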